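-- pv_equiv track=rewrite | github.com/IgrMd/yandex-algos-training | Тренировки по алгоритмам 2.0/Дивизион A/Домашнее задание № 2/B.py | min_manual_string
-- ===== SOURCE A (Python) =====
-- def check(x, z, z_i):
--     x_i = len(x) - 1
--     while x_i >= 0 and z_i >= 0 and x[x_i] == z[z_i]:
--         x_i -= 1
--         z_i -= 1
--     return z_i < 0
--
-- def min_manual_string(x: str, z: str):
--     x = x * (len(z) // len(x) + 1)
--     z_i = len(z) - 1
--     while z_i >= 0:
--         if z[z_i] != x[-1]:
--             z_i -= 1
--             continue
--         if check(x, z, z_i):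
--             return z[z_i + 1:]
--         else:
--             z_i -= 1
--     return z
-- ===== SOURCE B (Python) =====
-- def min_manual_string(x: str, z: str):
--     # Forward single scan over prefix lengths with a slice suffix test,
--     # instead of A's backward scan with a hand-written char-by-char matcher.
--     rep = x * (len(z) // len(x) + 1)
--     best = 0
--     for m in range(1, len(z) + 1):
--         if rep.endswith(z[:m]):
--             best = m
--     return z[best:]
-- ===== Notes on version B (the rewrite author's own statement) =====
-- stated objective: simpler
-- what changed: A scans z backward with a last-char skip heuristic and a hand-written char-by-char backward suffix matcher, returning at the first (longest) match; B makes one forward pass over prefix lengths 1..len(z), testing each with the library slice test rep.endswith(z[:m]) and keeping the last match.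
import Mathlib
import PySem

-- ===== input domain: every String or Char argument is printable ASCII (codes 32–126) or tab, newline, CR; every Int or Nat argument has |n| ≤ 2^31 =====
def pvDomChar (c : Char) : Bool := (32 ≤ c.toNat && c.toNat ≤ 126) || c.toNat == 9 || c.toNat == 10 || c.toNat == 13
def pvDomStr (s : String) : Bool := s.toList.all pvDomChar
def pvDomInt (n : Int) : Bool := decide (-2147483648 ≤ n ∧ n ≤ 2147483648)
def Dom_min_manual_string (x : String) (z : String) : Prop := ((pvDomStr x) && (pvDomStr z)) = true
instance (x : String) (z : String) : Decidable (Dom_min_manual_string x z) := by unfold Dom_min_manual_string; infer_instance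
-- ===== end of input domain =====

-- B replaces A's backward scan with hand-written char-by-char suffix matching (and a
-- last-char skip heuristic) by one forward pass over prefix lengths with a library
-- suffix test, keeping the last match; objective: simpler. Same worst-case cost.

-- ===== PORT A =====
-- while x_i >= 0 and z_i >= 0 and x[x_i] == z[z_i]: ... ; return z_i < 0
-- (indices checked >= 0 by the loop condition and always < length in reachable
-- states, so getD is exact for Python's x[x_i] / z[z_i] here)
def pvCheck (x z : List Char) (xi zi : Int) : Bool :=
  if h : 0 ≤ xi ∧ 0 ≤ zi ∧ x.getD xi.toNat ' ' = z.getD zi.toNat ' ' then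
    pvCheck x z (xi - 1) (zi - 1)
  else decide (zi < 0)
termination_by (zi + 1).toNat
decreasing_by omega

-- the 'while z_i >= 0' loop of min_manual_string; rep is the already-repeated x.
-- x[-1] is ported as getD (rep.length - 1): rep is nonempty whenever Pre_ holds,
-- where this equals Python's negative indexing; z[z_i+1:] with 0 <= z_i+1 <= len(z)
-- is exactly drop.
def pvALoop (rep z : List Char) (zi : Int) : List Char :=
  if h : 0 ≤ zi then
    if z.getD zi.toNat ' ' ≠ rep.getD (rep.length - 1) ' ' then
      pvALoop rep z (zi - 1)
    else if pvCheck rep z ((rep.length : Int) - 1) zi then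
      z.drop (zi + 1).toNat
    else
      pvALoop rep z (zi - 1)
  else z
termination_by (zi + 1).toNat
decreasing_by all_goals omega

def min_manual_string (x : String) (z : String) : String :=
  let xs := x.toList
  let zs := z.toList
  -- x = x * (len(z) // len(x) + 1); Pre_ excludes x = "" (Python: ZeroDivisionError)
  let rep := (List.replicate (zs.length / xs.length + 1) xs).flatten
  String.mk (pvALoop rep zs ((zs.length : Int) - 1))

-- ===== PORT B =====
def min_manual_string_alt (x : String) (z : String) : String :=
  let xs := x.toList
  let zs := z.toList
  let rep := (List.replicate (zs.length / xs.length + 1) xs).flatten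
  -- for m in range(1, len(z)+1): if rep.endswith(z[:m]): best = m
  let best := (List.range' 1 zs.length).foldl
    (fun best m => if (zs.take m).isSuffixOf rep then m else best) 0
  String.mk (zs.drop best)

-- ===== PRECONDITION & SPEC =====
-- Pre_ excludes only x = "", on which A raises ZeroDivisionError (len(z) // len(x)).
def Pre_min_manual_string (x : String) (z : String) : Prop := x ≠ ""
instance (x : String) (z : String) : Decidable (Pre_min_manual_string x z) := by unfold Pre_min_manual_string; infer_instance
def pvWitness_min_manual_string : String × String := ("ab", "abab")

def Spec_min_manual_string (x : String) (z : String) (out : String) : Prop := out = min_manual_string_alt x z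
instance (x : String) (z : String) (out : String) : Decidable (Spec_min_manual_string x z out) := by unfold Spec_min_manual_string; infer_instance

-- ===== CLAIM (what is proved, stated in full; the proofs are below) =====
def Claim_equal_min_manual_string : Prop := ∀ (x : String) (z : String), Dom_min_manual_string x z → Pre_min_manual_string x z → Spec_min_manual_string x z (min_manual_string x z)

-- ===== LEMMAS AND PROOFS =====

-- suffix relation on one-element extensions at the back
theorem pv_concat_suffix_concat (u v : List Char) (c d : Char) :
    (u ++ [c]) <:+ (v ++ [d]) ↔ u <:+ v ∧ c = d := by
  rw [← List.reverse_prefix]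
  simp [List.cons_prefix_cons, List.reverse_prefix]
  tauto

theorem pv_len_rep (xs : List Char) (k : ℕ) :
    ((List.replicate k xs).flatten).length = k * xs.length := by
  induction k with
  | zero => simp
  | succ k ih => simp [List.replicate_succ, ih, Nat.succ_mul]; ring

-- B's fold after the first a prefix lengths
def pvBest (zs rep : List Char) (a : ℕ) : ℕ :=
  (List.range' 1 a).foldl (fun best m => if (zs.take m).isSuffixOf rep then m else best) 0

theorem pvBest_succ (zs rep : List Char) (a : ℕ) :
    pvBest zs rep (a + 1) =
      if (zs.take (a + 1)).isSuffixOf rep then a + 1 else pvBest zs rep a := by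
  unfold pvBest
  have h : List.range' 1 (a + 1) = List.range' 1 a ++ [1 + a] := by
    simpa using (List.range'_concat (s := 1) (n := a) (step := 1))
  rw [h, List.foldl_append]
  simp [Nat.add_comm 1 a]

-- check(x, z, z_i) decides "z[:z_i+1] is a suffix of x[:x_i+1]"
theorem pv_check_iff (rep zs : List Char) :
    ∀ (a : ℕ), ∀ (b : ℕ), a < zs.length → a ≤ b → b < rep.length →
      (pvCheck rep zs (b : Int) (a : Int) = true ↔ zs.take (a + 1) <:+ rep.take (b + 1)) := by
  intro a
  induction a with
  | zero =>
    intro b ha hab hb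
    rw [pvCheck]
    simp only [Int.toNat_natCast]
    have htz : zs.take 1 = [] ++ [zs.getD 0 ' '] := by
      cases zs with
      | nil => simp at ha
      | cons c t => simp
    have htr : rep.take (b + 1) = rep.take b ++ [rep.getD b ' '] := by
      rw [List.take_succ]
      simp [List.getD_eq_getElem?_getD, List.getElem?_eq_getElem hb]
    by_cases hc : rep.getD b ' ' = zs.getD 0 ' '
    · rw [dif_pos ⟨by omega, by omega, hc⟩]
      rw [pvCheck, dif_neg (by rintro ⟨-, h, -⟩; omega)]
      simp only [decide_eq_true_eq]
      rw [htz, htr]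
      constructor
      · intro _
        exact (pv_concat_suffix_concat _ _ _ _).2 ⟨List.nil_suffix, hc.symm⟩
      · intro _; omega
    · rw [dif_neg (by rintro ⟨-, -, h⟩; exact hc h)]
      simp only [decide_eq_true_eq]
      rw [htz, htr]
      constructor
      · intro h0; exact absurd h0 (by omega)
      · intro hs
        exact absurd (((pv_concat_suffix_concat _ _ _ _).1 hs).2.symm) hc
  | succ a ih =>
    intro b ha hab hb
    rw [pvCheck]
    simp only [Int.toNat_natCast]
    have htz : zs.take (a + 2) = zs.take (a + 1) ++ [zs.getD (a + 1) ' '] := by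
      rw [List.take_succ]
      simp [List.getD_eq_getElem?_getD, List.getElem?_eq_getElem ha]
    have htr : rep.take (b + 1) = rep.take b ++ [rep.getD b ' '] := by
      rw [List.take_succ]
      simp [List.getD_eq_getElem?_getD, List.getElem?_eq_getElem hb]
    by_cases hc : rep.getD b ' ' = zs.getD (a + 1) ' '
    · rw [dif_pos ⟨by omega, by omega, hc⟩]
      have e1 : (b : Int) - 1 = ((b - 1 : ℕ) : Int) := by omega
      have e2 : ((a + 1 : ℕ) : Int) - 1 = ((a : ℕ) : Int) := by push_cast; omega
      rw [e1, e2, ih (b - 1) (by omega) (by omega) (by omega)]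
      have hb' : b - 1 + 1 = b := by omega
      rw [hb', htz, htr]
      constructor
      · intro h; exact (pv_concat_suffix_concat _ _ _ _).2 ⟨h, hc.symm⟩
      · intro h; exact ((pv_concat_suffix_concat _ _ _ _).1 h).1
    · rw [dif_neg (by rintro ⟨-, -, h⟩; exact hc h)]
      simp only [decide_eq_true_eq]
      rw [htz, htr]
      constructor
      · intro h0; exact absurd h0 (by omega)
      · intro hs
        exact absurd (((pv_concat_suffix_concat _ _ _ _).1 hs).2.symm) hc

-- if the last characters differ, z[:a+1] is not a suffix of rep
theorem pv_skip_sound (rep zs : List Char) (a : ℕ) (ha : a < zs.length)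
    (hrep : rep ≠ []) (hne : zs.getD a ' ' ≠ rep.getD (rep.length - 1) ' ') :
    ¬ zs.take (a + 1) <:+ rep := by
  intro h
  have hl : 1 ≤ rep.length := by
    cases rep with
    | nil => exact absurd rfl hrep
    | cons c t => simp
  have htz : zs.take (a + 1) = zs.take a ++ [zs.getD a ' '] := by
    rw [List.take_succ]
    simp [List.getElem?_eq_getElem ha, List.getD_eq_getElem?_getD,
          List.getElem?_eq_getElem ha]
  have hbr : rep.length - 1 < rep.length := by omega
  have htr : rep = rep.take (rep.length - 1) ++ [rep.getD (rep.length - 1) ' '] := by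
    conv_lhs => rw [← List.take_length (l := rep)]
    have : rep.length = (rep.length - 1) + 1 := by omega
    rw [this, List.take_succ]
    simp [List.getElem?_eq_getElem hbr, List.getD_eq_getElem?_getD,
          List.getElem?_eq_getElem hbr]
  rw [htz] at h
  conv at h => rw [htr]
  exact hne ((pv_concat_suffix_concat _ _ _ _).1 h).2

-- the whole of A's outer loop computes B's fold
theorem pv_aloop_eq (rep zs : List Char) (hrep : rep ≠ []) (hlen : zs.length < rep.length) :
    ∀ (a : ℕ), a ≤ zs.length →
      pvALoop rep zs ((a : Int) - 1) = zs.drop (pvBest zs rep a) := by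
  intro a
  induction a with
  | zero =>
    intro _
    rw [pvALoop, dif_neg (by omega)]
    simp [pvBest]
  | succ a ih =>
    intro ha
    have ha' : a < zs.length := by omega
    have e : ((a + 1 : ℕ) : Int) - 1 = ((a : ℕ) : Int) := by push_cast; omega
    rw [e, pvALoop, dif_pos (by omega)]
    simp only [Int.toNat_natCast]
    rw [pvBest_succ]
    have echeck : ((rep.length : ℕ) : Int) - 1 = ((rep.length - 1 : ℕ) : Int) := by omega
    by_cases hP : zs.take (a + 1) <:+ rep
    · -- the prefix matches: last chars agree, check succeeds, A returns z[z_i+1:]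
      have hlast : zs.getD a ' ' = rep.getD (rep.length - 1) ' ' := by
        by_contra hne
        exact pv_skip_sound rep zs a ha' hrep hne hP
      rw [if_neg (not_ne_iff.mpr hlast)]
      have hchk : pvCheck rep zs ((rep.length : Int) - 1) (a : Int) = true := by
        rw [echeck, pv_check_iff rep zs a (rep.length - 1) ha' (by omega) (by omega)]
        have hlr : rep.length - 1 + 1 = rep.length := by omega
        rw [hlr, List.take_length]
        exact hP
      have hBt : (List.take (a + 1) zs).isSuffixOf rep = true := by
        rw [List.isSuffixOf_iff_suffix]; exact hP
      have ht : ((a : Int) + 1).toNat = a + 1 := by omega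
      rw [if_pos hchk, if_pos hBt, ht]
    · -- no match at this length: both branches of A recurse; B's fold keeps its best
      have hBf : ¬ (List.take (a + 1) zs).isSuffixOf rep = true := by
        rw [List.isSuffixOf_iff_suffix]; exact hP
      rw [if_neg hBf]
      by_cases hc : zs.getD a ' ' = rep.getD (rep.length - 1) ' '
      · rw [if_neg (not_ne_iff.mpr hc)]
        have hchk : ¬ (pvCheck rep zs ((rep.length : Int) - 1) (a : Int) = true) := by
          rw [echeck, pv_check_iff rep zs a (rep.length - 1) ha' (by omega) (by omega)]
          have hlr : rep.length - 1 + 1 = rep.length := by omega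
          rw [hlr, List.take_length]
          exact hP
        rw [if_neg hchk]
        exact ih (by omega)
      · rw [if_pos hc]
        exact ih (by omega)

-- ===== VERDICT (by name: the statement is the Claim_ definition above) =====
theorem min_manual_string_spec : Claim_equal_min_manual_string := by
  intro x z _ hpre
  unfold Spec_min_manual_string min_manual_string min_manual_string_alt
  have hx : x.toList ≠ [] := by
    intro h
    apply hpre
    have := congrArg String.ofList h
    simpa using this
  have hxlen : 1 ≤ x.toList.length := by
    cases hxl : x.toList with
    | nil => exact absurd hxl hx
    | cons c t => simp
  set xs := x.toList
  set zs := z.toList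
  set rep := (List.replicate (zs.length / xs.length + 1) xs).flatten with hrepdef
  have hlen : zs.length < rep.length := by
    rw [hrepdef, pv_len_rep]
    have h1 := Nat.div_add_mod zs.length xs.length
    have h2 : zs.length % xs.length < xs.length := Nat.mod_lt _ (by omega)
    have h3 : (zs.length / xs.length + 1) * xs.length
        = xs.length * (zs.length / xs.length) + xs.length := by ring
    omega
  have hrep : rep ≠ [] := by
    intro h
    rw [h] at hlen
    simp at hlen
  show String.mk (pvALoop rep zs ((zs.length : Int) - 1))
      = String.mk (zs.drop (pvBest zs rep zs.length))
  rw [pv_aloop_eq rep zs hrep hlen zs.length le_rfl]
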